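-- pv_equiv track=rewrite | github.com/lewesmint/snmp-sim | app/mib_registrar.py | _find_table_related_objects
-- ===== SOURCE A (Python) =====
-- from typing import Any, Dict, Optional, Set
--
-- def _find_table_related_objects(mib_json: Dict[str, Any]) -> Set[str]:
--     """Find all table-related object names."""
--     table_related = set()
--
--     for name, info in mib_json.items():
--         if not isinstance(info, dict):
--             continue
--
--         if name.endswith("Table") or name.endswith("Entry"):
--             table_related.add(name)
--
--             # Also mark columns as table-related
--             if name.endswith("Entry"):
--                 entry_oid = tuple(info.get("oid", []))
--                 for col_name, col_info in mib_json.items():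
--                     if isinstance(col_info, dict):
--                         col_oid = tuple(col_info.get("oid", []))
--                         if col_oid and len(col_oid) > len(entry_oid):
--                             if col_oid[: len(entry_oid)] == entry_oid:
--                                 table_related.add(col_name)
--
--     return table_related
-- ===== SOURCE B (Python) =====
-- def _find_table_related_objects(mib_json):
--     """Find all table-related object names.
--
--     Precompute each object's oid tuple once, then bucket descendant columns
--     per Entry in a single sweep over (column, entry) pairs, and emit the
--     result in one final pass.
--     """
--     named_oids = [(name, tuple(info.get("oid", []))) for name, info in mib_json.items()]
--     entries = [(name, oid) for name, oid in named_oids if name.endswith("Entry")]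
--     pairs = [(name, col) for col, o in named_oids
--              for name, e in entries
--              if len(o) > len(e) and o[:len(e)] == e]
--     buckets = {name: [] for name, _ in entries}
--     for name, col in pairs:
--         buckets[name].append(col)
--     out = []
--     for name, _ in named_oids:
--         if name.endswith("Table") or name.endswith("Entry"):
--             out.append(name)
--             if name.endswith("Entry"):
--                 out.extend(buckets[name])
--     return set(out)
-- ===== Notes on version B (the rewrite author's own statement) =====
-- stated objective: alternative
-- what changed: B extracts every object's oid once, collects the Entry objects, assigns columns to per-entry buckets in a single inverted sweep over (column, entry) pairs and emits the result in one final pass, instead of A's per-entry rescan of the whole dict that re-extracts and re-tuples every column's oid for every entry.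
import Mathlib
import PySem

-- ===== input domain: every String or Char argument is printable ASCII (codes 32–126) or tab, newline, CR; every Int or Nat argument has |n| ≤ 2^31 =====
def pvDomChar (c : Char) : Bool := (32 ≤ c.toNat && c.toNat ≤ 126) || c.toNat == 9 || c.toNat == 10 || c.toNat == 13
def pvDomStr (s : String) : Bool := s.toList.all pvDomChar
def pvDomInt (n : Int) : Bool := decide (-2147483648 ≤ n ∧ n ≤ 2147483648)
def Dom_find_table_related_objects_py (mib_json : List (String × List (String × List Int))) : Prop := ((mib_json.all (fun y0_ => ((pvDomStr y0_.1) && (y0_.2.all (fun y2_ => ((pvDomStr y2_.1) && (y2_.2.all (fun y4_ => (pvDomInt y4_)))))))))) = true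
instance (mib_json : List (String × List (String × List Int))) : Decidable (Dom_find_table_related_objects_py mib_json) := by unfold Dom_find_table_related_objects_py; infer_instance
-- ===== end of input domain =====

-- B precomputes each object's oid once, collects the Entry objects, buckets descendant
-- columns per entry in one sweep over (column, entry) pairs, and emits the result in a
-- final pass — instead of A's per-entry rescan of the whole dict with per-pair oid
-- extraction. Equivalence is about the returned set's first-insertion list.

-- ===== PORT A =====
def find_table_related_objects_py (mib_json : List (String × List (String × List Int))) : List String :=
  -- `isinstance(info, dict)` is always true for this input type, so the `continue` is dead
  mib_json.foldl (fun table_related p =>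
    if PySem.Str.endswith p.1 "Table" || PySem.Str.endswith p.1 "Entry" then
      let table_related := PySem.Set.add table_related p.1
      if PySem.Str.endswith p.1 "Entry" then
        let entry_oid := (PySem.Dict.mk p.2).getD "oid" []
        mib_json.foldl (fun tr2 q =>
          let col_oid := (PySem.Dict.mk q.2).getD "oid" []
          if col_oid ≠ [] ∧ col_oid.length > entry_oid.length then
            if PySem.List.slice col_oid none (some (entry_oid.length : Int)) = entry_oid then
              PySem.Set.add tr2 q.1
            else tr2
          else tr2) table_related
      else table_related
    else table_related) []

-- ===== PORT B =====
def find_table_related_objects_py_alt (mib_json : List (String × List (String × List Int))) : List String :=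
  let named_oids := mib_json.map (fun p => (p.1, (PySem.Dict.mk p.2).getD "oid" []))
  let entries := named_oids.filter (fun q => PySem.Str.endswith q.1 "Entry")
  let pairs := named_oids.flatMap (fun c =>
    (entries.filter (fun q =>
        decide (c.2.length > q.2.length) &&
        (PySem.List.slice c.2 none (some (q.2.length : Int)) == q.2))).map (fun q => (q.1, c.1)))
  let buckets0 := entries.foldl (fun d q => d.insert q.1 ([] : List String)) PySem.Dict.empty
  let buckets := pairs.foldl (fun d r => d.modify r.1 [] (fun l => l ++ [r.2])) buckets0
  let out := named_oids.foldl (fun out p =>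
    if PySem.Str.endswith p.1 "Table" || PySem.Str.endswith p.1 "Entry" then
      let out := out ++ [p.1]
      if PySem.Str.endswith p.1 "Entry" then
        out ++ buckets.getD p.1 []   -- `buckets[name]`: the key is always present (name is an entry)
      else out
    else out) []
  PySem.Set.ofList out

-- ===== PRECONDITION & SPEC =====
-- Pre_ excludes association lists whose outer keys repeat: they do not encode a Python
-- dict (Python collapses duplicate keys before A ever runs), so the list ports iterate
-- pairs the Python dicts never contain.
def Pre_find_table_related_objects_py (mib_json : List (String × List (String × List Int))) : Prop :=
  (mib_json.map Prod.fst).Nodup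
instance (mib_json : List (String × List (String × List Int))) : Decidable (Pre_find_table_related_objects_py mib_json) := by unfold Pre_find_table_related_objects_py; infer_instance

def pvWitness_find_table_related_objects_py : (List (String × List (String × List Int))) :=
  [("ifTable", [("oid", [1, 2])]),
   ("ifEntry", [("oid", [1, 2, 1])]),
   ("ifIndex", [("oid", [1, 2, 1, 1])]),
   ("sysDescr", [("oid", [1, 1])])]

def Spec_find_table_related_objects_py (mib_json : List (String × List (String × List Int))) (out : List String) : Prop := out = find_table_related_objects_py_alt mib_json
instance (mib_json : List (String × List (String × List Int))) (out : List String) : Decidable (Spec_find_table_related_objects_py mib_json out) := by unfold Spec_find_table_related_objects_py; infer_instance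

-- ===== CLAIM (what is proved, stated in full; the proofs are below) =====
def Claim_equal_find_table_related_objects_py : Prop := ∀ (mib_json : List (String × List (String × List Int))), Dom_find_table_related_objects_py mib_json → Pre_find_table_related_objects_py mib_json → Spec_find_table_related_objects_py mib_json (find_table_related_objects_py mib_json)


-- ===== LEMMAS AND PROOFS =====

-- proof-side vocabulary (mirrors the two ports)
def pvOid (info : List (String × List Int)) : List Int := (PySem.Dict.mk info).getD "oid" []

def pvT (p : String × List (String × List Int)) : String × List Int := (p.1, pvOid p.2)

def pvMatch (e o : List Int) : Bool :=
  decide (o.length > e.length) && (PySem.List.slice o none (some (e.length : Int)) == e)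

def pvDesc (m : List (String × List (String × List Int))) (e : List Int) : List String :=
  (m.filter (fun q => pvMatch e (pvOid q.2))).map Prod.fst

def pvSeq (m : List (String × List (String × List Int))) : List String :=
  m.flatMap (fun p =>
    if PySem.Str.endswith p.1 "Table" || PySem.Str.endswith p.1 "Entry" then
      p.1 :: (if PySem.Str.endswith p.1 "Entry" then pvDesc m (pvOid p.2) else [])
    else [])

def pvNamed (m : List (String × List (String × List Int))) : List (String × List Int) := m.map pvT

def pvEntries (m : List (String × List (String × List Int))) : List (String × List Int) :=
  (pvNamed m).filter (fun q => PySem.Str.endswith q.1 "Entry")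

def pvPairs (m : List (String × List (String × List Int))) : List (String × String) :=
  (pvNamed m).flatMap (fun c =>
    ((pvEntries m).filter (fun q =>
        decide (c.2.length > q.2.length) &&
        (PySem.List.slice c.2 none (some (q.2.length : Int)) == q.2))).map (fun q => (q.1, c.1)))

def pvBuckets0 (m : List (String × List (String × List Int))) : PySem.Dict String (List String) :=
  (pvEntries m).foldl (fun d q => d.insert q.1 ([] : List String)) PySem.Dict.empty

def pvBuckets (m : List (String × List (String × List Int))) : PySem.Dict String (List String) :=
  (pvPairs m).foldl (fun d r => d.modify r.1 [] (fun l => l ++ [r.2])) (pvBuckets0 m)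

def pvOut (m : List (String × List (String × List Int))) : List String :=
  (pvNamed m).foldl (fun out p =>
    if PySem.Str.endswith p.1 "Table" || PySem.Str.endswith p.1 "Entry" then
      let out := out ++ [p.1]
      if PySem.Str.endswith p.1 "Entry" then
        out ++ (pvBuckets m).getD p.1 []
      else out
    else out) []

-- B's port is exactly its pieces
lemma alt_eq_ofList_pvOut (m : List (String × List (String × List Int))) :
    find_table_related_objects_py_alt m = PySem.Set.ofList (pvOut m) := rfl

-- A's inner scan over the whole dict updates the set by the matching column names, in order
lemma innerA_eq (e : List Int) (m : List (String × List (String × List Int))) :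
    ∀ acc : PySem.Set String,
      m.foldl (fun tr2 q =>
        if (PySem.Dict.mk q.2).getD "oid" [] ≠ [] ∧ ((PySem.Dict.mk q.2).getD "oid" []).length > e.length then
          if PySem.List.slice ((PySem.Dict.mk q.2).getD "oid" []) none (some (e.length : Int)) = e then
            PySem.Set.add tr2 q.1
          else tr2
        else tr2) acc
      = PySem.Set.update acc (pvDesc m e) := by
  induction m with
  | nil => intro acc; simp [pvDesc, pysem]
  | cons q t ih =>
    intro acc
    simp only [List.foldl_cons, pvDesc, List.filter_cons]
    by_cases h1 : ((PySem.Dict.mk q.2).getD "oid" [] : List Int) ≠ [] ∧ ((PySem.Dict.mk q.2).getD "oid" [] : List Int).length > e.length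
    · by_cases h2 : PySem.List.slice ((PySem.Dict.mk q.2).getD "oid" []) none (some (e.length : Int)) = e
      · have hm : pvMatch e (pvOid q.2) = true := by
          unfold pvMatch pvOid
          rw [Bool.and_eq_true, decide_eq_true_iff, beq_iff_eq]
          exact ⟨h1.2, h2⟩
        simp only [if_pos h1, if_pos h2, hm, if_pos]
        rw [ih, ← PySem.Set.update_cons]
        simp [pvDesc]
      · have hm : pvMatch e (pvOid q.2) = false := by
          unfold pvMatch pvOid
          rw [Bool.and_eq_false_iff]
          right
          rw [beq_eq_false_iff_ne]
          exact h2
        simp only [if_pos h1, if_neg h2, hm]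
        rw [ih]
        simp [pvDesc]
    · have hm : pvMatch e (pvOid q.2) = false := by
        unfold pvMatch pvOid
        rw [Bool.and_eq_false_iff]
        left
        rw [decide_eq_false_iff_not]
        intro hlt
        exact h1 ⟨List.ne_nil_of_length_pos (by omega), hlt⟩
      simp only [if_neg h1, hm]
      rw [ih]
      simp [pvDesc]

-- A's outer loop updates the set by pvSeq
lemma outerA_eq (m : List (String × List (String × List Int))) :
    ∀ (l : List (String × List (String × List Int))) (acc : PySem.Set String),
      l.foldl (fun table_related p =>
        if PySem.Str.endswith p.1 "Table" || PySem.Str.endswith p.1 "Entry" then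
          if PySem.Str.endswith p.1 "Entry" then
            m.foldl (fun tr2 q =>
              if (PySem.Dict.mk q.2).getD "oid" [] ≠ [] ∧ ((PySem.Dict.mk q.2).getD "oid" []).length > ((PySem.Dict.mk p.2).getD "oid" []).length then
                if PySem.List.slice ((PySem.Dict.mk q.2).getD "oid" []) none (some ((((PySem.Dict.mk p.2).getD "oid" []) : List Int).length : Int)) = (PySem.Dict.mk p.2).getD "oid" [] then
                  PySem.Set.add tr2 q.1
                else tr2
              else tr2) (PySem.Set.add table_related p.1)
          else PySem.Set.add table_related p.1
        else table_related) acc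
      = PySem.Set.update acc (l.flatMap (fun p =>
          if PySem.Str.endswith p.1 "Table" || PySem.Str.endswith p.1 "Entry" then
            p.1 :: (if PySem.Str.endswith p.1 "Entry" then pvDesc m (pvOid p.2) else [])
          else [])) := by
  intro l
  induction l with
  | nil => intro acc; simp only [List.foldl_nil, List.flatMap_nil, PySem.Set.update_nil]
  | cons p t ih =>
    intro acc
    simp only [List.foldl_cons, List.flatMap_cons]
    by_cases hE : PySem.Str.endswith p.1 "Entry" = true
    · have hTE : (PySem.Str.endswith p.1 "Table" || PySem.Str.endswith p.1 "Entry") = true := by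
        rw [hE, Bool.or_true]
      rw [hTE, hE]
      simp only [reduceIte]
      rw [innerA_eq ((PySem.Dict.mk p.2).getD "oid" []) m, ih,
          List.cons_append, PySem.Set.update_cons, PySem.Set.update_append]
      rfl
    · have hE' : PySem.Str.endswith p.1 "Entry" = false := by
        simpa using hE
      by_cases hT : PySem.Str.endswith p.1 "Table" = true
      · have hTE : (PySem.Str.endswith p.1 "Table" || PySem.Str.endswith p.1 "Entry") = true := by
          rw [hT, Bool.true_or]
        rw [hTE, hE']
        simp only [reduceIte, Bool.false_eq_true]
        rw [ih, List.cons_append, List.nil_append, PySem.Set.update_cons]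
      · have hT' : PySem.Str.endswith p.1 "Table" = false := by simpa using hT
        have hTE : (PySem.Str.endswith p.1 "Table" || PySem.Str.endswith p.1 "Entry") = false := by
          rw [hT', hE', Bool.or_false]
        rw [hTE]
        simp only [reduceIte, Bool.false_eq_true]
        rw [ih, List.nil_append]

lemma portA_eq_ofList_pvSeq (m : List (String × List (String × List Int))) :
    find_table_related_objects_py m = PySem.Set.ofList (pvSeq m) := by
  have h := outerA_eq m m []
  rw [PySem.Set.update_nil_left] at h
  exact h

-- every lookup in the initial bucket dict yields []
lemma getD_foldl_insert_nil (l : List (String × List Int)) :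
    ∀ (d : PySem.Dict String (List String)), (∀ k, d.getD k [] = []) →
      ∀ nm, (l.foldl (fun d q => d.insert q.1 ([] : List String)) d).getD nm [] = [] := by
  induction l with
  | nil => intro d hd nm; exact hd nm
  | cons q t ih =>
    intro d hd nm
    simp only [List.foldl_cons]
    refine ih _ (fun k => ?_) nm
    rw [PySem.Dict.getD_insert]
    split <;> simp [hd]

lemma buckets0_getD (m : List (String × List (String × List Int))) (nm : String) :
    (pvBuckets0 m).getD nm [] = [] :=
  getD_foldl_insert_nil _ PySem.Dict.empty (fun k => by simp [pysem]) nm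

-- with distinct names, nm picks exactly its own entry pair
lemma filter_fst_eq_of_nodup {ν : Type} (l : List (String × ν)) (nm : String) (e : ν)
    (hnd : (l.map Prod.fst).Nodup) (hmem : (nm, e) ∈ l) :
    l.filter (fun q => q.1 == nm) = [(nm, e)] := by
  induction l with
  | nil => simp at hmem
  | cons q t ih =>
    simp only [List.map_cons, List.nodup_cons] at hnd
    rcases List.mem_cons.mp hmem with h | h
    · subst h
      simp only [List.filter_cons, beq_self_eq_true, if_pos]
      have : t.filter (fun q => q.1 == nm) = [] := by
        apply List.filter_eq_nil_iff.mpr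
        intro a ha
        simp only [beq_iff_eq]
        intro hfst
        have hin : a.1 ∈ t.map Prod.fst := List.mem_map_of_mem ha
        rw [hfst] at hin
        exact hnd.1 hin
      simp [this]
    · have hin : nm ∈ t.map Prod.fst := List.mem_map_of_mem h
      have hne : q.1 ≠ nm := by
        intro hq
        rw [hq] at hnd
        exact hnd.1 hin
      simp only [List.filter_cons]
      rw [if_neg (by simp [hne])]
      exact ih hnd.2 h

lemma entries_fst_nodup (m : List (String × List (String × List Int)))
    (hnd : (m.map Prod.fst).Nodup) : ((pvEntries m).map Prod.fst).Nodup := by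
  have h1 : (pvNamed m).map Prod.fst = m.map Prod.fst := by
    simp [pvNamed, pvT, Function.comp]
  have h2 : ((pvEntries m).map Prod.fst).Sublist ((pvNamed m).map Prod.fst) :=
    List.Sublist.map Prod.fst List.filter_sublist
  rw [h1] at h2
  exact hnd.sublist h2

lemma flatMap_if_singleton {α β : Type} (l : List α) (p : α → Bool) (f : α → β) :
    (l.flatMap (fun x => if p x then [f x] else [])) = (l.filter p).map f := by
  induction l with
  | nil => rfl
  | cons x t ih =>
    simp only [List.flatMap_cons, List.filter_cons]
    by_cases h : p x = true
    · simp [h, ih]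
    · simp [h, ih, Bool.false_eq_true]

-- the bucket of an entry collects exactly its descendant column names, in order
lemma bucket_getD (m : List (String × List (String × List Int))) (nm : String) (e : List Int)
    (hnd : (m.map Prod.fst).Nodup) (hmem : (nm, e) ∈ pvEntries m) :
    (pvBuckets m).getD nm [] = pvDesc m e := by
  unfold pvBuckets
  rw [PySem.Dict.getD_foldl_modify_append, buckets0_getD, List.nil_append]
  unfold pvPairs
  rw [List.filter_flatMap]
  have hstep : ∀ c : String × List Int,
      (((pvEntries m).filter (fun q =>
          decide (c.2.length > q.2.length) &&
          (PySem.List.slice c.2 none (some (q.2.length : Int)) == q.2))).map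
            (fun q => (q.1, c.1))).filter (fun r => r.1 == nm)
      = if pvMatch e c.2 then [(nm, c.1)] else [] := by
    intro c
    rw [List.filter_map]
    have hcomp : ((fun (r : String × String) => r.1 == nm) ∘ (fun q : String × List Int => (q.1, c.1)))
        = fun q : String × List Int => q.1 == nm := rfl
    rw [hcomp, List.filter_comm, filter_fst_eq_of_nodup _ nm e (entries_fst_nodup m hnd) hmem]
    by_cases h : pvMatch e c.2 = true
    · have h' : (decide (c.2.length > e.length) && (PySem.List.slice c.2 none (some (e.length : Int)) == e)) = true := h
      simp only [List.filter_cons, h', List.filter_nil, if_pos, List.map_cons, List.map_nil]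
      rw [if_pos h]
    · have h' : (decide (c.2.length > e.length) && (PySem.List.slice c.2 none (some (e.length : Int)) == e)) = false := by
        rw [Bool.not_eq_true] at h
        exact h
      simp only [List.filter_cons, h', Bool.false_eq_true, if_false, List.filter_nil, List.map_nil]
      rw [if_neg h]
  calc ((pvNamed m).flatMap (fun c =>
          (((pvEntries m).filter (fun q =>
              decide (c.2.length > q.2.length) &&
              (PySem.List.slice c.2 none (some (q.2.length : Int)) == q.2))).map
                (fun q => (q.1, c.1))).filter (fun r => r.1 == nm))).map (fun r => r.2)
      = ((pvNamed m).flatMap (fun c => if pvMatch e c.2 then [(nm, c.1)] else [])).map (fun r => r.2) := by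
        rw [List.flatMap_congr (fun c _ => hstep c)]
    _ = (pvNamed m).flatMap (fun c => if pvMatch e c.2 then [c.1] else []) := by
        rw [List.map_flatMap]
        refine List.flatMap_congr (fun c _ => ?_)
        by_cases h : pvMatch e c.2 = true <;> simp [h]
    _ = ((pvNamed m).filter (fun c => pvMatch e c.2)).map Prod.fst := by
        rw [flatMap_if_singleton]
    _ = pvDesc m e := by
        unfold pvNamed pvDesc
        rw [List.filter_map, List.map_map]
        rfl

-- B's emission loop concatenates per-object events
lemma outB_aux (m : List (String × List (String × List Int))) :
    ∀ (l : List (String × List Int)) (acc : List String),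
      l.foldl (fun out p =>
        if PySem.Str.endswith p.1 "Table" || PySem.Str.endswith p.1 "Entry" then
          if PySem.Str.endswith p.1 "Entry" then
            (out ++ [p.1]) ++ (pvBuckets m).getD p.1 []
          else out ++ [p.1]
        else out) acc
      = acc ++ l.flatMap (fun p =>
          if PySem.Str.endswith p.1 "Table" || PySem.Str.endswith p.1 "Entry" then
            p.1 :: (if PySem.Str.endswith p.1 "Entry" then (pvBuckets m).getD p.1 [] else [])
          else []) := by
  intro l
  induction l with
  | nil => intro acc; simp only [List.foldl_nil, List.flatMap_nil, List.append_nil]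
  | cons p t ih =>
    intro acc
    simp only [List.foldl_cons, List.flatMap_cons]
    by_cases hE : PySem.Str.endswith p.1 "Entry" = true
    · have hTE : (PySem.Str.endswith p.1 "Table" || PySem.Str.endswith p.1 "Entry") = true := by
        rw [hE, Bool.or_true]
      rw [hTE, hE]
      simp only [reduceIte]
      rw [ih]
      simp [List.append_assoc]
    · have hE' : PySem.Str.endswith p.1 "Entry" = false := Bool.eq_false_iff.mpr hE
      by_cases hT : PySem.Str.endswith p.1 "Table" = true
      · have hTE : (PySem.Str.endswith p.1 "Table" || PySem.Str.endswith p.1 "Entry") = true := by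
          rw [hT, Bool.true_or]
        rw [hTE, hE']
        simp only [reduceIte, Bool.false_eq_true]
        rw [ih]
        simp [List.append_assoc]
      · have hTE : (PySem.Str.endswith p.1 "Table" || PySem.Str.endswith p.1 "Entry") = false := by
          rw [Bool.eq_false_iff.mpr hT, hE', Bool.or_false]
        rw [hTE]
        simp only [reduceIte, Bool.false_eq_true]
        rw [ih, List.nil_append]

lemma pvOut_eq_pvSeq (m : List (String × List (String × List Int)))
    (hnd : (m.map Prod.fst).Nodup) : pvOut m = pvSeq m := by
  have h : pvOut m = (pvNamed m).flatMap (fun p =>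
      if PySem.Str.endswith p.1 "Table" || PySem.Str.endswith p.1 "Entry" then
        p.1 :: (if PySem.Str.endswith p.1 "Entry" then (pvBuckets m).getD p.1 [] else [])
      else []) := by
    have := outB_aux m (pvNamed m) []
    rw [List.nil_append] at this
    exact this
  rw [h]
  unfold pvNamed
  rw [List.flatMap_map]
  refine List.flatMap_congr (fun p hp => ?_)
  by_cases hE : PySem.Str.endswith p.1 "Entry" = true
  · have hmem : (p.1, pvOid p.2) ∈ pvEntries m :=
      List.mem_filter.mpr ⟨List.mem_map_of_mem hp, hE⟩
    have hb := bucket_getD m p.1 (pvOid p.2) hnd hmem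
    show (if PySem.Str.endswith p.1 "Table" || PySem.Str.endswith p.1 "Entry" then
      p.1 :: (if PySem.Str.endswith p.1 "Entry" then (pvBuckets m).getD p.1 [] else [])
      else []) = _
    rw [hb]
  · have hE' : PySem.Str.endswith p.1 "Entry" = false := Bool.eq_false_iff.mpr hE
    show (if PySem.Str.endswith p.1 "Table" || PySem.Str.endswith p.1 "Entry" then
        p.1 :: (if PySem.Str.endswith p.1 "Entry" then (pvBuckets m).getD p.1 [] else [])
      else []) = _
    rw [hE']
    simp only [Bool.false_eq_true, if_false]

-- ===== VERDICT (by name: the statement is the Claim_ definition above) =====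
theorem find_table_related_objects_py_spec : Claim_equal_find_table_related_objects_py := by
  intro m _hdom hpre
  unfold Spec_find_table_related_objects_py
  rw [portA_eq_ofList_pvSeq, alt_eq_ofList_pvOut, pvOut_eq_pvSeq m hpre]
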